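-- pv_equiv track=rewrite | github.com/ashwinsharma89/pca_o | src/engine/reports/template_analyzer.py | _detect_granularity
-- ===== SOURCE A (Python) =====
-- from typing import Dict, Any, List, Optional, Tuple
--
-- def _detect_granularity(dimension_cols: List[str]) -> str:
--     """Detect the granularity level from dimension columns."""
--     dim_lower = [d.lower() for d in dimension_cols]
--
--     if any('date' in d or 'day' in d for d in dim_lower):
--         return "daily"
--     elif any('week' in d for d in dim_lower):
--         return "weekly"
--     elif any('month' in d for d in dim_lower):
--         return "monthly"
--     elif any('platform' in d or 'channel' in d for d in dim_lower):
--         return "platform"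
--     elif any('campaign' in d for d in dim_lower):
--         return "campaign"
--     elif any('device' in d for d in dim_lower):
--         return "device"
--     elif any('age' in d or 'gender' in d for d in dim_lower):
--         return "demographic"
--
--     return "aggregate"
-- ===== SOURCE B (Python) =====
-- def _detect_granularity(dimension_cols):
--     """Accumulate the set of matched category labels in one pass over the
--     columns, then resolve by a fixed priority list."""
--     rules = [
--         ("daily", ("date", "day")),
--         ("weekly", ("week",)),
--         ("monthly", ("month",)),
--         ("platform", ("platform", "channel")),
--         ("campaign", ("campaign",)),
--         ("device", ("device",)),
--         ("demographic", ("age", "gender")),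
--     ]
--     matched = set()
--     for col in dimension_cols:
--         c = col.lower()
--         for label, kws in rules:
--             if any(k in c for k in kws):
--                 matched.add(label)
--     for label, _ in rules:
--         if label in matched:
--             return label
--     return "aggregate"
-- ===== Notes on version B (the rewrite author's own statement) =====
-- stated objective: alternative
-- what changed: A runs one ordered any()-scan of the column list per category with early return; B makes a single pass over the columns accumulating a set of all matched category labels and then resolves the winner in a separate priority-list pass.
import Mathlib
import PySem

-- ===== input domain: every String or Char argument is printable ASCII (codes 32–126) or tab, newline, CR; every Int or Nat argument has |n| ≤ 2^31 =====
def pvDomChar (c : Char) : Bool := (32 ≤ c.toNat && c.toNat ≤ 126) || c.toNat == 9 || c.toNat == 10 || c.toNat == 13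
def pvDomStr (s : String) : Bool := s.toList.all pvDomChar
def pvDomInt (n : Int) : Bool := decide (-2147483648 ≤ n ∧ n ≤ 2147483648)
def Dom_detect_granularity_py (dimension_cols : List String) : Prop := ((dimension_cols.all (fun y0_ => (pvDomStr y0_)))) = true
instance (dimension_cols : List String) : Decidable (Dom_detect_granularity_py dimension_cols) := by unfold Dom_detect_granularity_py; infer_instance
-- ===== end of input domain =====

-- B replaces A's per-category ordered any()-scans by one accumulation pass building the set
-- of matched labels, followed by a separate priority-resolution pass (alternative decomposition).

-- ===== PORT A =====
def detect_granularity_py (dimension_cols : List String) : String :=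
  let dim_lower := dimension_cols.map (fun d => PySem.Str.lower d)
  if dim_lower.any (fun d => PySem.Str.isIn "date" d || PySem.Str.isIn "day" d) then "daily"
  else if dim_lower.any (fun d => PySem.Str.isIn "week" d) then "weekly"
  else if dim_lower.any (fun d => PySem.Str.isIn "month" d) then "monthly"
  else if dim_lower.any (fun d => PySem.Str.isIn "platform" d || PySem.Str.isIn "channel" d) then "platform"
  else if dim_lower.any (fun d => PySem.Str.isIn "campaign" d) then "campaign"
  else if dim_lower.any (fun d => PySem.Str.isIn "device" d) then "device"
  else if dim_lower.any (fun d => PySem.Str.isIn "age" d || PySem.Str.isIn "gender" d) then "demographic"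
  else "aggregate"

-- ===== PORT B =====
-- the fixed priority rule table of Source B
def bRules : List (String × List String) :=
  [("daily", ["date", "day"]), ("weekly", ["week"]), ("monthly", ["month"]),
   ("platform", ["platform", "channel"]), ("campaign", ["campaign"]),
   ("device", ["device"]), ("demographic", ["age", "gender"])]

-- 'for col in dimension_cols: for label, kws in rules: if any(...): matched.add(label)'
def bMatched (dimension_cols : List String) : PySem.Set String :=
  dimension_cols.foldl (fun matched col =>
    let c := PySem.Str.lower col
    bRules.foldl (fun matched r =>
      if r.2.any (fun k => PySem.Str.isIn k c) then PySem.Set.add matched r.1 else matched) matched)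
    PySem.Set.empty

-- 'for label, _ in rules: if label in matched: return label / return "aggregate"'
def bResolve (rs : List (String × List String)) (matched : PySem.Set String) : String :=
  match rs with
  | [] => "aggregate"
  | r :: rest => if PySem.Set.contains matched r.1 then r.1 else bResolve rest matched

def detect_granularity_py_alt (dimension_cols : List String) : String :=
  bResolve bRules (bMatched dimension_cols)

-- ===== PRECONDITION & SPEC =====
def Spec_detect_granularity_py (dimension_cols : List String) (out : String) : Prop := out = detect_granularity_py_alt dimension_cols
instance (dimension_cols : List String) (out : String) : Decidable (Spec_detect_granularity_py dimension_cols out) := by unfold Spec_detect_granularity_py; infer_instance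

-- ===== CLAIM (what is proved, stated in full; the proofs are below) =====
def Claim_equal_detect_granularity_py : Prop := ∀ (dimension_cols : List String), Dom_detect_granularity_py dimension_cols → Spec_detect_granularity_py dimension_cols (detect_granularity_py dimension_cols)

-- ===== LEMMAS AND PROOFS =====

-- the match condition of one rule row against one column
def condOf (kws : List String) (col : String) : Bool :=
  kws.any (fun k => PySem.Str.isIn k (PySem.Str.lower col))

theorem contains_add (s : PySem.Set String) (x y : String) :
    PySem.Set.contains (PySem.Set.add s y) x = (PySem.Set.contains s x || decide (x = y)) := by
  rw [PySem.Set.add_eq_ite]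
  split_ifs with h
  · by_cases hxy : x = y
    · subst hxy; simp [PySem.Set.contains_eq_listContains, h]
    · simp [hxy]
  · simp [PySem.Set.contains_eq_listContains]

theorem contains_ite_add (c : Bool) (s : PySem.Set String) (x y : String) :
    PySem.Set.contains (if c = true then PySem.Set.add s y else s) x
      = (PySem.Set.contains s x || (c && decide (x = y))) := by
  cases c
  · simp
  · rw [if_pos rfl, contains_add]; simp

theorem contains_bMatched_aux (L : String) (kws : List String)
    (hmem : (L, kws) ∈ bRules)
    (cols : List String) (s : PySem.Set String) :
    PySem.Set.contains
      (cols.foldl (fun matched col =>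
        bRules.foldl (fun matched r =>
          if r.2.any (fun k => PySem.Str.isIn k (PySem.Str.lower col)) then PySem.Set.add matched r.1 else matched) matched) s) L
      = (PySem.Set.contains s L || cols.any (condOf kws)) := by
  induction cols generalizing s with
  | nil => simp
  | cons col rest ih =>
    rw [List.foldl_cons, ih, List.any_cons]
    have hstep : ∀ t : PySem.Set String,
        PySem.Set.contains
          (bRules.foldl (fun matched r =>
            if r.2.any (fun k => PySem.Str.isIn k (PySem.Str.lower col)) then PySem.Set.add matched r.1 else matched) t) L
        = (PySem.Set.contains t L || condOf kws col) := by
      intro t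
      fin_cases hmem <;>
        simp only [bRules, List.foldl, contains_ite_add] <;> simp [condOf]
    rw [hstep, Bool.or_assoc, Bool.or_comm (condOf kws col)]

theorem contains_bMatched (L : String) (kws : List String)
    (hmem : (L, kws) ∈ bRules) (cols : List String) :
    PySem.Set.contains (bMatched cols) L = cols.any (condOf kws) := by
  rw [bMatched, contains_bMatched_aux L kws hmem]
  simp [PySem.Set.empty, PySem.Set.contains_eq_listContains]

-- ===== VERDICT (by name: the statement is the Claim_ definition above) =====
theorem detect_granularity_py_spec : Claim_equal_detect_granularity_py := by
  intro cols _
  unfold Spec_detect_granularity_py detect_granularity_py detect_granularity_py_alt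
  rw [show bRules = [("daily", ["date", "day"]), ("weekly", ["week"]), ("monthly", ["month"]),
    ("platform", ["platform", "channel"]), ("campaign", ["campaign"]),
    ("device", ["device"]), ("demographic", ["age", "gender"])] from rfl]
  simp only [bResolve]
  rw [contains_bMatched "daily" ["date", "day"] (by decide),
      contains_bMatched "weekly" ["week"] (by decide),
      contains_bMatched "monthly" ["month"] (by decide),
      contains_bMatched "platform" ["platform", "channel"] (by decide),
      contains_bMatched "campaign" ["campaign"] (by decide),
      contains_bMatched "device" ["device"] (by decide),
      contains_bMatched "demographic" ["age", "gender"] (by decide)]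
  simp [condOf, List.any_map, Function.comp]
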